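-- pv_equiv track=rewrite | github.com/joie-zhang/bargain | visualization/create_mmlu_ordered_heatmaps.py | get_models_with_data
-- ===== SOURCE A (Python) =====
-- MMLU_PRO_SCORES = {
--     # Strong models we're looking for
--     'claude-3-5-haiku': 64.1,
--     'claude-3-5-sonnet': 78.4,  # Using "claude-3-5-sonnet-20241022" -> "Claude 3.5 Sonnet Latest"
--     'claude-4-1-opus': 87.8,
--     'claude-4-sonnet': 79.4,
--     'gemma-3-27b': 67.5,  # from HF leaderboard
--     'gemini-2-0-flash': 77.4,
--     'gemini-2-5-pro': 84.1,  # Using "Gemini 2.5 Pro Exp"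
--     'gpt-4o-mini': 62.7,
--     'gpt-4o-2024-11-20': 69.1,
--     'o1': 83.5,
--     'o3': 85.6,
--     'gpt-5-mini': 83.7,
--     'gpt-5-nano': 78.0,
--
--     # Baseline models
--     'gpt-4o-2024-05-13': 72.55,  # from HF leaderboard
--     'gemini-1-5-pro': 75.3,  # Using "Gemini 1.5 Pro (002)"
--     'claude-3-opus': 68.45,  # from HF leaderboard
-- }
--
-- def get_models_with_data(results_by_competition):
--     """Get the list of strong models that actually have data, ordered by MMLU-Pro score."""
--     models_with_data = set()
--     for comp_level in results_by_competition:
--         for baseline in results_by_competition[comp_level]: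
--             for strong in results_by_competition[comp_level][baseline]:
--                 if results_by_competition[comp_level][baseline][strong]:  # has data
--                     models_with_data.add(strong)
--
--     # Filter to only include models we have MMLU scores for and sort by score
--     models_with_scores = []
--     for model in models_with_data:
--         if model in MMLU_PRO_SCORES and MMLU_PRO_SCORES[model] is not None:
--             models_with_scores.append((model, MMLU_PRO_SCORES[model]))
--
--     # Sort by MMLU-Pro score (ascending - worst to best)
--     models_with_scores.sort(key=lambda x: x[1])
--
--     return [model for model, score in models_with_scores]
-- ===== SOURCE B (Python) =====
-- MMLU_PRO_SCORES = {
--     'claude-3-5-haiku': 64.1,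
--     'claude-3-5-sonnet': 78.4,
--     'claude-4-1-opus': 87.8,
--     'claude-4-sonnet': 79.4,
--     'gemma-3-27b': 67.5,
--     'gemini-2-0-flash': 77.4,
--     'gemini-2-5-pro': 84.1,
--     'gpt-4o-mini': 62.7,
--     'gpt-4o-2024-11-20': 69.1,
--     'o1': 83.5,
--     'o3': 85.6,
--     'gpt-5-mini': 83.7,
--     'gpt-5-nano': 78.0,
--     'gpt-4o-2024-05-13': 72.55,
--     'gemini-1-5-pro': 75.3,
--     'claude-3-opus': 68.45,
-- }
--
-- # The score table is constant, so the sort is done once on the table itself;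
-- # per call we only collect the data-bearing models and filter the pre-sorted order.
-- _ORDER = sorted(MMLU_PRO_SCORES, key=MMLU_PRO_SCORES.get)
--
-- def get_models_with_data(results_by_competition):
--     models_with_data = {strong
--                        for comp_data in results_by_competition.values()
--                        for baseline_data in comp_data.values()
--                        for strong, runs in baseline_data.items()
--                        if runs}
--     return [m for m in _ORDER if m in models_with_data]
-- ===== Notes on version B (the rewrite author's own statement) =====
-- stated objective: simpler
-- what changed: B builds the data-bearing set with a single comprehension and, instead of pairing models with scores and sorting per call, filters a score-table order pre-sorted once at module load; exact because all table scores are distinct.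
import Mathlib
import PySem

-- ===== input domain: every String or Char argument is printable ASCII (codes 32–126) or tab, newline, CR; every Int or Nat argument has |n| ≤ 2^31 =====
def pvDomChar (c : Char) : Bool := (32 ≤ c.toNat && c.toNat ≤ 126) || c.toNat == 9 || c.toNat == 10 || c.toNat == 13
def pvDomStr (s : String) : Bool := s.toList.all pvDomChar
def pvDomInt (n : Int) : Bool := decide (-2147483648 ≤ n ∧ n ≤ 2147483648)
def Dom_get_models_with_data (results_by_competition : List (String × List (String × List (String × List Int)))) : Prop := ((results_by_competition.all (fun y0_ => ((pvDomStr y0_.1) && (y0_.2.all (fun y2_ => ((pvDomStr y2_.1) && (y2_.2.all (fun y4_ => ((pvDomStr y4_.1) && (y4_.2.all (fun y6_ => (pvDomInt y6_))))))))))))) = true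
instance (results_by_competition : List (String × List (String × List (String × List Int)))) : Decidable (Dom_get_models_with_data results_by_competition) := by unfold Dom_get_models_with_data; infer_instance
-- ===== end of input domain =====

-- B pre-sorts the constant score table once and filters it by membership, instead of A's
-- filter-then-sort of the collected set; objective: simpler (exact since all scores are distinct).

-- ===== PORT A =====
-- MMLU_PRO_SCORES with scores ×100 as Int: every score has ≤ 2 decimals and the code only
-- ever compares scores, so the scaling is order-exact.
def mmluScores : PySem.Dict String Int := PySem.Dict.ofList
  [("claude-3-5-haiku", 6410), ("claude-3-5-sonnet", 7840), ("claude-4-1-opus", 8780),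
   ("claude-4-sonnet", 7940), ("gemma-3-27b", 6750), ("gemini-2-0-flash", 7740),
   ("gemini-2-5-pro", 8410), ("gpt-4o-mini", 6270), ("gpt-4o-2024-11-20", 6910),
   ("o1", 8350), ("o3", 8560), ("gpt-5-mini", 8370), ("gpt-5-nano", 7800),
   ("gpt-4o-2024-05-13", 7255), ("gemini-1-5-pro", 7530), ("claude-3-opus", 6845)]

-- 'for k in d: … d[k] …' ported as a fold over the (unique-keyed) association pairs, the
-- pair's value being d[k]; 'model in MMLU_PRO_SCORES and MMLU_PRO_SCORES[model] is not None'
-- is the get?-is-some test (no table value is None).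
def get_models_with_data (results_by_competition : List (String × List (String × List (String × List Int)))) : List String :=
  let models_with_data : PySem.Set String :=
    results_by_competition.foldl (fun s comp_level =>
      comp_level.2.foldl (fun s baseline =>
        baseline.2.foldl (fun s strong =>
          if strong.2 ≠ [] then PySem.Set.add s strong.1 else s) s) s) PySem.Set.empty
  let models_with_scores : List (String × Int) :=
    models_with_data.foldl (fun acc model =>
      match mmluScores.get? model with
      | some sc => acc ++ [(model, sc)]
      | none => acc) []
  (PySem.List.sorted models_with_scores (fun x => x.2) false).map (fun p => p.1)

-- ===== PORT B =====
-- _ORDER = sorted(MMLU_PRO_SCORES, key=MMLU_PRO_SCORES.get) (all keys present, so .get is getD)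
def mmluOrder : List String :=
  PySem.List.sorted mmluScores.keys (fun k => mmluScores.getD k 0) false

def get_models_with_data_alt (results_by_competition : List (String × List (String × List (String × List Int)))) : List String :=
  let models_with_data : PySem.Set String :=
    PySem.Set.ofList (results_by_competition.flatMap (fun comp_data =>
      comp_data.2.flatMap (fun baseline_data =>
        (baseline_data.2.filter (fun p => decide (p.2 ≠ []))).map Prod.fst)))
  mmluOrder.filter (fun m => PySem.Set.contains models_with_data m)

-- ===== PRECONDITION & SPEC =====
def Spec_get_models_with_data (results_by_competition : List (String × List (String × List (String × List Int)))) (out : List String) : Prop := out = get_models_with_data_alt results_by_competition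
instance (results_by_competition : List (String × List (String × List (String × List Int)))) (out : List String) : Decidable (Spec_get_models_with_data results_by_competition out) := by unfold Spec_get_models_with_data; infer_instance

-- ===== CLAIM (what is proved, stated in full; the proofs are below) =====
def Claim_equal_get_models_with_data : Prop := ∀ (results_by_competition : List (String × List (String × List (String × List Int)))), Dom_get_models_with_data results_by_competition → Spec_get_models_with_data results_by_competition (get_models_with_data results_by_competition)

-- ===== LEMMAS AND PROOFS =====

-- the flattened collection list B uses
def pvFlat (rbc : List (String × List (String × List (String × List Int)))) : List String :=
  rbc.flatMap (fun comp_data =>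
    comp_data.2.flatMap (fun baseline_data =>
      (baseline_data.2.filter (fun p => decide (p.2 ≠ []))).map Prod.fst))

lemma foldl_if_add_eq (l : List (String × List Int)) (s : PySem.Set String) :
    l.foldl (fun s strong => if strong.2 ≠ [] then PySem.Set.add s strong.1 else s) s
      = ((l.filter (fun p => decide (p.2 ≠ []))).map Prod.fst).foldl PySem.Set.add s := by
  induction l generalizing s with
  | nil => rfl
  | cons hd tl ih =>
    simp only [List.foldl_cons, List.filter_cons]
    by_cases h : hd.2 = []
    · rw [if_neg (fun hc : hd.2 ≠ [] => hc h), if_neg (by simp [h]), ih]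
    · rw [if_pos h, if_pos (by simp [h]), List.map_cons, List.foldl_cons, ih]

lemma foldl_lvl2_eq (l : List (String × List (String × List Int))) (s : PySem.Set String) :
    l.foldl (fun s baseline =>
        baseline.2.foldl (fun s strong =>
          if strong.2 ≠ [] then PySem.Set.add s strong.1 else s) s) s
      = (l.flatMap (fun baseline_data =>
          (baseline_data.2.filter (fun p => decide (p.2 ≠ []))).map Prod.fst)).foldl PySem.Set.add s := by
  induction l generalizing s with
  | nil => rfl
  | cons hd tl ih =>
    simp only [List.foldl_cons, List.flatMap_cons, List.foldl_append, foldl_if_add_eq]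
    have ih' := ih (List.foldl PySem.Set.add s
      (List.map Prod.fst (List.filter (fun p => decide (p.2 ≠ [])) hd.2)))
    simp only [foldl_if_add_eq] at ih'
    exact ih' 

lemma setA_eq (rbc : List (String × List (String × List (String × List Int)))) :
    rbc.foldl (fun s comp_level =>
        comp_level.2.foldl (fun s baseline =>
          baseline.2.foldl (fun s strong =>
            if strong.2 ≠ [] then PySem.Set.add s strong.1 else s) s) s) PySem.Set.empty
      = PySem.Set.ofList (pvFlat rbc) := by
  rw [PySem.Set.ofList_eq_foldl, pvFlat]
  have gen : ∀ (l : List (String × List (String × List (String × List Int)))) (s : PySem.Set String),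
      l.foldl (fun s comp_level =>
        comp_level.2.foldl (fun s baseline =>
          baseline.2.foldl (fun s strong =>
            if strong.2 ≠ [] then PySem.Set.add s strong.1 else s) s) s) s
      = (l.flatMap (fun comp_data =>
          comp_data.2.flatMap (fun baseline_data =>
            (baseline_data.2.filter (fun p => decide (p.2 ≠ []))).map Prod.fst))).foldl PySem.Set.add s := by
    intro l
    induction l with
    | nil => intro s; rfl
    | cons hd tl ih =>
      intro s
      simp only [List.foldl_cons, List.flatMap_cons, List.foldl_append, foldl_lvl2_eq]
      have ih' := ih (List.foldl PySem.Set.add s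
        (List.flatMap (fun baseline_data =>
          List.map Prod.fst (List.filter (fun p => decide (p.2 ≠ [])) baseline_data.2)) hd.2))
      simp only [foldl_lvl2_eq] at ih'
      exact ih'
  exact gen rbc PySem.Set.empty

lemma pairs_foldl_eq (S : List String) (acc : List (String × Int)) :
    S.foldl (fun acc model =>
        match mmluScores.get? model with
        | some sc => acc ++ [(model, sc)]
        | none => acc) acc
      = acc ++ (S.filter (fun m => (mmluScores.get? m).isSome)).map
          (fun m => (m, mmluScores.getD m 0)) := by
  induction S generalizing acc with
  | nil => simp
  | cons hd tl ih =>
    cases h : mmluScores.get? hd with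
    | none => simp [h, ih]
    | some sc =>
      simp [h, ih, PySem.Dict.getD_eq_get?_getD]

lemma mmluOrder_nodup : mmluOrder.Nodup :=
  (PySem.List.sorted_perm mmluScores.keys (fun k => mmluScores.getD k 0) false).nodup_iff.mpr
    (by decide)

lemma mmluOrder_pairwise :
    mmluOrder.Pairwise (fun a b => mmluScores.getD a 0 < mmluScores.getD b 0) := by decide

lemma mem_mmluOrder (m : String) : m ∈ mmluOrder ↔ (mmluScores.get? m).isSome = true := by
  rw [mmluOrder, PySem.List.mem_sorted, ← PySem.Dict.contains_iff_mem_keys,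
    PySem.Dict.contains_eq_isSome_get?]

lemma main_eq (rbc : List (String × List (String × List (String × List Int)))) :
    get_models_with_data rbc = get_models_with_data_alt rbc := by
  have halt : get_models_with_data_alt rbc
      = mmluOrder.filter (fun m => (PySem.Set.ofList (pvFlat rbc)).contains m) := rfl
  rw [halt]
  simp only [get_models_with_data, setA_eq, pairs_foldl_eq, List.nil_append]
  set S : PySem.Set String := PySem.Set.ofList (pvFlat rbc) with hS
  set f : String → String × Int := fun m => (m, mmluScores.getD m 0) with hf
  have hperm : ((mmluOrder.filter (fun m => PySem.Set.contains S m)).map f).Perm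
      ((S.filter (fun m => (mmluScores.get? m).isSome)).map f) := by
    refine List.Perm.map f ?_
    refine (List.perm_ext_iff_of_nodup ?_ ?_).mpr ?_
    · exact mmluOrder_nodup.filter _
    · exact (PySem.Set.nodup_ofList (pvFlat rbc)).filter _
    · intro a
      simp only [List.mem_filter, mem_mmluOrder, PySem.Set.contains_eq_listContains,
        List.contains_iff_mem]
      tauto
  have hpw : ((mmluOrder.filter (fun m => PySem.Set.contains S m)).map f).Pairwise
      (fun a b => a.2 < b.2) := by
    rw [List.pairwise_map]
    exact List.Pairwise.sublist List.filter_sublist mmluOrder_pairwise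
  have hs := PySem.List.sorted_eq_of_perm_of_pairwise_lt
    _ _ (fun x : String × Int => x.2) hperm hpw
  rw [hs, List.map_map]
  have hid : ((fun p : String × Int => p.1) ∘ f) = id := rfl
  rw [hid, List.map_id]

-- ===== VERDICT (by name: the statement is the Claim_ definition above) =====
theorem get_models_with_data_spec : Claim_equal_get_models_with_data := by
  intro rbc _
  exact main_eq rbc
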